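-- pv_equiv track=rewrite | github.com/robertobalestri/TRAILDREAMS-Framework | src/quotes.py | preprocess_transcript
-- ===== SOURCE A (Python) =====
-- def preprocess_transcript(raw_transcript):
--     """
--     Preprocesses a raw transcript by splitting it into timestamped entries.
--
--     Args:
--         raw_transcript (str): The raw transcript to be processed.
--
--     Returns:
--         list: A list of tuples containing timestamp and corresponding text entries.
--     """
--     entries = []
--     lines = raw_transcript.split('\n')
--     i = 0
--     while i < len(lines):
--         if '-->' in lines[i]:
--             timestamp = lines[i].strip()
--             text = ""
--             i += 1
--             while i < len(lines) and lines[i].strip() != "":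
--                 text += lines[i].strip() + " "
--                 i += 1
--             entries.append((timestamp, text.strip()))
--         i += 1
--     return entries
-- ===== SOURCE B (Python) =====
-- def preprocess_transcript(raw_transcript):
--     """Splits the transcript into blocks of consecutive non-blank lines, then
--     turns each block containing a '-->' line into one (timestamp, text) entry."""
--     lines = raw_transcript.split('\n')
--     blocks = []
--     cur = []
--     for line in lines:
--         if line.strip() != "":
--             cur.append(line)
--         else:
--             if cur:
--                 blocks.append(cur)
--                 cur = []
--     if cur:
--         blocks.append(cur)
--     entries = []
--     for block in blocks:
--         for j, line in enumerate(block):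
--             if '-->' in line:
--                 entries.append((line.strip(), ' '.join(l.strip() for l in block[j + 1:])))
--                 break
--     return entries
-- ===== Notes on version B (the rewrite author's own statement) =====
-- stated objective: simpler
-- what changed: Replaced A's index-driven nested while loops (scan for '-->', then consume following lines while bumping a shared index) with a two-phase decomposition: group the lines into blocks of consecutive non-blank lines, then map each block containing a '-->' line to one (timestamp, ' '.join(...)) entry.
import Mathlib
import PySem

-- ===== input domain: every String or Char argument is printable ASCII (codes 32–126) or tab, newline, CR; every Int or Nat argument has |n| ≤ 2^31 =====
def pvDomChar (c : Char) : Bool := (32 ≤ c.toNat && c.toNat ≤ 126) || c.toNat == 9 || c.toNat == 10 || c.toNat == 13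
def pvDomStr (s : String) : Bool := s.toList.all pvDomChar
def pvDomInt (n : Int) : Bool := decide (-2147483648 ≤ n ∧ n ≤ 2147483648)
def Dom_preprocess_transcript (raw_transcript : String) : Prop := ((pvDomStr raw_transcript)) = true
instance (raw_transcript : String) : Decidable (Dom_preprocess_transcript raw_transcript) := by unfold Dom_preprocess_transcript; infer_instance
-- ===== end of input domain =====

-- B groups the lines into blocks of consecutive non-blank lines first and then maps each
-- block with a '-->' line to one entry (objective: simpler decomposition, same cost).

-- l.strip() != ""  (shared predicate of both Pythons)
def pvNb (l : List Char) : Bool := !(PySem.Chars.strip l == [])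
-- '-->' in l
def pvArrow (l : List Char) : Bool := PySem.Chars.isIn "-->".toList l

-- ===== PORT A =====
-- inner while loop: consume non-blank lines, accumulating `text`; returns (text, remaining lines)
def pvConsume : List (List Char) → List Char → List Char × List (List Char)
  | [], text => (text, [])
  | l :: r, text =>
    if pvNb l then pvConsume r (text ++ PySem.Chars.strip l ++ [' '])
    else (text, l :: r)

theorem pvConsume_length : ∀ (r : List (List Char)) (t : List Char),
    (pvConsume r t).2.length ≤ r.length := by
  intro r
  induction r with
  | nil => intro t; simp [pvConsume]
  | cons l r ih =>
    intro t
    simp only [pvConsume]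
    split
    · exact le_trans (ih _) (Nat.le_succ _)
    · simp

-- outer while loop over the lines
def pvGoA : List (List Char) → List (List Char × List Char)
  | [] => []
  | l :: r =>
    if pvArrow l then
      (PySem.Chars.strip l, PySem.Chars.strip (pvConsume r []).1) :: pvGoA ((pvConsume r []).2.tail)
    else pvGoA r
termination_by ls => ls.length
decreasing_by
  · have h1 := pvConsume_length r []
    have h2 : ((pvConsume r []).2.tail).length ≤ (pvConsume r []).2.length := by
      cases (pvConsume r []).2 <;> simp
    simp only [List.length_cons]
    omega
  · simp

def preprocess_transcript (raw_transcript : String) : List (String × String) :=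
  (pvGoA (PySem.Chars.splitOn raw_transcript.toList ['\n'])).map
    (fun p => (String.ofList p.1, String.ofList p.2))

-- ===== PORT B =====
-- one step of the block-building loop: state = (blocks so far, current block)
def pvStep (st : List (List (List Char)) × List (List Char)) (line : List Char) :
    List (List (List Char)) × List (List Char) :=
  if pvNb line then (st.1, st.2 ++ [line])
  else if st.2.isEmpty then st else (st.1 ++ [st.2], [])

def pvBlocks (lines : List (List Char)) : List (List (List Char)) :=
  let p := lines.foldl pvStep ([], [])
  if p.2.isEmpty then p.1 else p.1 ++ [p.2]

-- inner for loop with break: the entry of one block (empty list if no '-->' line)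
def pvParseBlock : List (List Char) → List (List Char × List Char)
  | [] => []
  | l :: r =>
    if pvArrow l then
      [(PySem.Chars.strip l, PySem.Chars.join [' '] (r.map PySem.Chars.strip))]
    else pvParseBlock r

def preprocess_transcript_alt (raw_transcript : String) : List (String × String) :=
  (((pvBlocks (PySem.Chars.splitOn raw_transcript.toList ['\n'])).foldl
      (fun es b => es ++ pvParseBlock b) []).map
    (fun p => (String.ofList p.1, String.ofList p.2)))

-- ===== PRECONDITION & SPEC =====
def Spec_preprocess_transcript (raw_transcript : String) (out : List (String × String)) : Prop := out = preprocess_transcript_alt raw_transcript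
instance (raw_transcript : String) (out : List (String × String)) : Decidable (Spec_preprocess_transcript raw_transcript out) := by unfold Spec_preprocess_transcript; infer_instance

-- ===== CLAIM (what is proved, stated in full; the proofs are below) =====
def Claim_equal_preprocess_transcript : Prop := ∀ (raw_transcript : String), Dom_preprocess_transcript raw_transcript → Spec_preprocess_transcript raw_transcript (preprocess_transcript raw_transcript)

-- ===== LEMMAS AND PROOFS =====

-- head of a dropWhile result fails the predicate
theorem pv_dw_head {α : Type} (p : α → Bool) (l : List α) (c : α) (t : List α)
    (h : l.dropWhile p = c :: t) : p c = false := by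
  induction l with
  | nil => simp at h
  | cons a l ih =>
    rw [List.dropWhile_cons] at h
    split at h
    · exact ih h
    · cases h
      simp_all
theorem pv_blank_all_space (l : List Char) (h : PySem.Chars.strip l = []) :
    ∀ c ∈ l, PySem.Chars.isspace c = true := by
  simp only [PySem.Chars.strip, PySem.Chars.rstrip, PySem.Chars.lstrip,
    List.reverse_eq_nil_iff, List.dropWhile_eq_nil_iff, List.mem_reverse] at h
  intro c hc
  rcases (List.mem_append.1 ((List.takeWhile_append_dropWhile
      (p := PySem.Chars.isspace) (l := l)) ▸ hc)) with h1 | h2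
  · exact List.mem_takeWhile_imp h1
  · exact h _ h2

theorem pv_blank_no_arrow (l : List Char) (h : pvNb l = false) : pvArrow l = false := by
  simp only [pvNb, Bool.not_eq_false', beq_iff_eq] at h
  by_contra harr
  have : pvArrow l = true := by revert harr; cases pvArrow l <;> simp
  rw [pvArrow, PySem.Chars.isIn_iff_infix] at this
  have hm : '-' ∈ l := this.subset (by simp)
  have := pv_blank_all_space l h '-' hm
  simp [PySem.Chars.isspace] at this

theorem pv_strip_head (x : List Char) (h : PySem.Chars.strip x ≠ []) :
    ∃ c t, PySem.Chars.strip x = c :: t ∧ PySem.Chars.isspace c = false := by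
  rcases hs : PySem.Chars.strip x with _ | ⟨c, t⟩
  · exact absurd hs h
  · refine ⟨c, t, rfl, ?_⟩
    have hpre : PySem.Chars.strip x <+: PySem.Chars.lstrip x := by
      have := (List.dropWhile_suffix (l := (PySem.Chars.lstrip x).reverse) PySem.Chars.isspace).reverse
      simpa [PySem.Chars.strip, PySem.Chars.rstrip] using this
    rw [hs] at hpre
    rcases hpre with ⟨s, hy⟩
    exact pv_dw_head PySem.Chars.isspace x c (t ++ s) (by
      simpa [PySem.Chars.lstrip] using hy.symm)

theorem pv_rstrip_append (a b : List Char) :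
    PySem.Chars.rstrip (a ++ b) =
      if (PySem.Chars.rstrip b).isEmpty then PySem.Chars.rstrip a else a ++ PySem.Chars.rstrip b := by
  simp only [PySem.Chars.rstrip, List.reverse_append, List.dropWhile_append,
    List.isEmpty_reverse]
  split <;> simp

theorem pv_dw_idem {α : Type} (p : α → Bool) (l : List α) :
    List.dropWhile p (List.dropWhile p l) = List.dropWhile p l := by
  rcases hs : List.dropWhile p l with _ | ⟨c, t⟩
  · simp
  · rw [List.dropWhile_cons_of_neg]
    simp [pv_dw_head p l c t hs]

theorem pv_rstrip_idem (y : List Char) : PySem.Chars.rstrip (PySem.Chars.rstrip y) = PySem.Chars.rstrip y := by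
  simp [PySem.Chars.rstrip, pv_dw_idem]

theorem pv_join_ne_nil (t : List Char) (ts : List (List Char)) (h : t ≠ []) :
    PySem.Chars.join [' '] (t :: ts) ≠ [] := by
  cases ts with
  | nil => simpa [PySem.Chars.join_singleton] using h
  | cons q rest =>
    rw [PySem.Chars.join_cons_cons]
    intro hc
    rcases List.append_eq_nil_iff.1 hc with ⟨h1, -⟩
    rcases List.append_eq_nil_iff.1 h1 with ⟨-, h2⟩
    simp at h2

theorem pv_rstrip_flatten (ls : List (List Char)) (h : ∀ x ∈ ls, PySem.Chars.strip x ≠ []) :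
    PySem.Chars.rstrip ((ls.map (fun x => PySem.Chars.strip x ++ [' '])).flatten) =
      PySem.Chars.join [' '] (ls.map PySem.Chars.strip) := by
  induction ls with
  | nil => simp [PySem.Chars.join_nil, PySem.Chars.rstrip]
  | cons x ls ih =>
    have hx : PySem.Chars.strip x ≠ [] := h x (by simp)
    have hls : ∀ y ∈ ls, PySem.Chars.strip y ≠ [] := fun y hy => h y (by simp [hy])
    simp only [List.map_cons, List.flatten_cons]
    rw [pv_rstrip_append]
    cases ls with
    | nil =>
      have h1 : PySem.Chars.rstrip ([] : List Char) = [] := by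
        simp [PySem.Chars.rstrip]
      have h2 : PySem.Chars.rstrip (PySem.Chars.strip x ++ [' '])
          = PySem.Chars.strip x := by
        rw [pv_rstrip_append]
        have : PySem.Chars.rstrip [' '] = [] := by decide
        rw [this]
        simp only [List.isEmpty_nil, if_pos]
        simpa [PySem.Chars.strip] using pv_rstrip_idem (PySem.Chars.lstrip x)
      simp [h1, h2, PySem.Chars.join_singleton]
    | cons z zs =>
      have hrest := ih hls
      have hne : PySem.Chars.join [' '] ((z :: zs).map PySem.Chars.strip) ≠ [] := by
        simp only [List.map_cons]
        exact pv_join_ne_nil _ _ (hls z (by simp))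
      rw [hrest, if_neg (by simpa [List.isEmpty_iff] using hne)]
      simp only [List.map_cons]
      rw [PySem.Chars.join_cons_cons]

theorem pv_strip_cat (ls : List (List Char)) (h : ∀ x ∈ ls, pvNb x = true) :
    PySem.Chars.strip ((ls.map (fun x => PySem.Chars.strip x ++ [' '])).flatten) =
      PySem.Chars.join [' '] (ls.map PySem.Chars.strip) := by
  have h' : ∀ x ∈ ls, PySem.Chars.strip x ≠ [] := by
    intro x hx
    have := h x hx
    simpa [pvNb] using this
  cases ls with
  | nil => simp [PySem.Chars.join_nil, PySem.Chars.strip, PySem.Chars.lstrip, PySem.Chars.rstrip]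
  | cons x ls' =>
    have hx := h' x (by simp)
    rcases pv_strip_head x hx with ⟨c, t, hct, hc⟩
    have hl : PySem.Chars.lstrip
        ((((x :: ls').map (fun x => PySem.Chars.strip x ++ [' '])).flatten))
        = (((x :: ls').map (fun x => PySem.Chars.strip x ++ [' '])).flatten) := by
      simp only [List.map_cons, List.flatten_cons, hct, PySem.Chars.lstrip]
      rw [List.cons_append, List.cons_append, List.dropWhile_cons_of_neg (by simp [hc])]
    rw [PySem.Chars.strip, hl]
    exact pv_rstrip_flatten _ h'

def pvHeadBlank : List (List Char) → Prop
  | [] => True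
  | h :: _ => pvNb h = false

theorem pv_consume_run : ∀ (tw : List (List Char)) (dw : List (List Char)) (text : List Char),
    (∀ x ∈ tw, pvNb x = true) → pvHeadBlank dw →
    pvConsume (tw ++ dw) text =
      (text ++ (tw.map (fun x => PySem.Chars.strip x ++ [' '])).flatten, dw) := by
  intro tw
  induction tw with
  | nil =>
    intro dw text _ hd
    cases dw with
    | nil => simp [pvConsume]
    | cons h t =>
      simp only [pvHeadBlank] at hd
      simp [pvConsume, hd]
  | cons x tw ih =>
    intro dw text hall hd
    have hx : pvNb x = true := hall x (by simp)
    simp only [List.cons_append, pvConsume, hx, if_pos]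
    rw [ih dw _ (fun y hy => hall y (by simp [hy])) hd]
    simp

theorem pv_run : ∀ (tw dw : List (List Char)),
    (∀ x ∈ tw, pvNb x = true) → pvHeadBlank dw →
    pvGoA (tw ++ dw) = pvParseBlock tw ++ pvGoA dw.tail := by
  intro tw
  induction tw with
  | nil =>
    intro dw _ hd
    cases dw with
    | nil => simp [pvParseBlock]
    | cons h t =>
      simp only [pvHeadBlank] at hd
      simp [pvGoA, pv_blank_no_arrow h hd, pvParseBlock]
  | cons x tw ih =>
    intro dw hall hd
    have htw : ∀ y ∈ tw, pvNb y = true := fun y hy => hall y (by simp [hy])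
    by_cases harr : pvArrow x
    · rw [List.cons_append, pvGoA]
      rw [if_pos harr, pv_consume_run tw dw [] htw hd]
      simp only [List.nil_append]
      rw [pv_strip_cat tw htw]
      simp [pvParseBlock, harr]
    · rw [List.cons_append, pvGoA, if_neg harr, ih dw htw hd]
      simp [pvParseBlock, harr]

def pvBlocksR : List (List Char) → List (List (List Char))
  | [] => []
  | l :: r =>
    if pvNb l then (l :: r.takeWhile pvNb) :: pvBlocksR (r.dropWhile pvNb)
    else pvBlocksR r
termination_by ls => ls.length
decreasing_by
  · have := List.length_dropWhile_le pvNb r; simp only [List.length_cons]; omega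
  · simp

theorem pv_headBlank_dropWhile (r : List (List Char)) : pvHeadBlank (r.dropWhile pvNb) := by
  rcases hs : r.dropWhile pvNb with _ | ⟨h, t⟩
  · simp [pvHeadBlank]
  · simpa [pvHeadBlank] using pv_dw_head pvNb r h t hs

theorem pv_goA_blocks : ∀ (n : ℕ) (ls : List (List Char)), ls.length ≤ n →
    pvGoA ls = (pvBlocksR ls).flatMap pvParseBlock := by
  intro n
  induction n with
  | zero =>
    intro ls hls
    rw [Nat.le_zero, List.length_eq_zero_iff] at hls
    subst hls
    simp [pvGoA, pvBlocksR]
  | succ n ih =>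
    intro ls hls
    cases ls with
    | nil => simp [pvGoA, pvBlocksR]
    | cons l r =>
      by_cases hnb : pvNb l
      · have hsplit : l :: r = (l :: r.takeWhile pvNb) ++ r.dropWhile pvNb := by
          simp [List.takeWhile_append_dropWhile]
        have hall : ∀ y ∈ l :: r.takeWhile pvNb, pvNb y = true := by
          intro y hy
          rcases List.mem_cons.1 hy with h1 | h2
          · subst h1; exact hnb
          · exact List.mem_takeWhile_imp h2
        rw [pvBlocksR, if_pos hnb, List.flatMap_cons]
        conv_lhs => rw [hsplit]
        rw [pv_run _ _ hall (pv_headBlank_dropWhile r)]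
        congr 1
        rcases hdw : r.dropWhile pvNb with _ | ⟨h, t⟩
        · simp [pvGoA, pvBlocksR]
        · have hlen : t.length ≤ n := by
            have h1 := List.length_dropWhile_le pvNb r
            rw [hdw] at h1
            simp only [List.length_cons] at h1 hls
            omega
          have hh : pvNb h = false := pv_dw_head pvNb r h t hdw
          simp only [List.tail_cons]
          rw [ih t hlen, pvBlocksR, if_neg (by simp [hh])]
      · rw [pvGoA, if_neg (by simpa using pv_blank_no_arrow l (by simpa using hnb))]
        rw [pvBlocksR, if_neg hnb]
        exact ih r (by simpa [Nat.lt_succ_iff] using Nat.lt_of_lt_of_le (Nat.lt_succ_self _) hls)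

def pvBlocksW (cur : List (List Char)) : List (List Char) → List (List (List Char))
  | [] => if cur.isEmpty then [] else [cur]
  | l :: r =>
    if pvNb l then pvBlocksW (cur ++ [l]) r
    else if cur.isEmpty then pvBlocksW [] r else cur :: pvBlocksW [] r

theorem pv_fold_W : ∀ (lines : List (List Char)) (bs : List (List (List Char))) (cur : List (List Char)),
    (let p := lines.foldl pvStep (bs, cur);
     if p.2.isEmpty then p.1 else p.1 ++ [p.2]) = bs ++ pvBlocksW cur lines := by
  intro lines
  induction lines with
  | nil =>
    intro bs cur
    simp only [List.foldl_nil, pvBlocksW]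
    split <;> simp_all
  | cons l r ih =>
    intro bs cur
    simp only [List.foldl_cons, pvBlocksW, pvStep]
    by_cases hnb : pvNb l
    · simp only [if_pos hnb]
      exact ih bs (cur ++ [l])
    · simp only [if_neg hnb]
      by_cases hcur : cur.isEmpty
      · have : cur = [] := by simpa [List.isEmpty_iff] using hcur
        subst this
        simpa using ih bs []
      · simp only [if_neg hcur]
        rw [ih (bs ++ [cur]) []]
        simp

theorem pv_W : ∀ (r : List (List Char)) (cur : List (List Char)),
    pvBlocksW cur r =
      if cur.isEmpty then pvBlocksR r
      else (cur ++ r.takeWhile pvNb) :: pvBlocksR (r.dropWhile pvNb) := by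
  intro r
  induction r with
  | nil =>
    intro cur
    simp only [pvBlocksW, pvBlocksR, List.takeWhile_nil, List.dropWhile_nil]
    split <;> simp
  | cons x r ih =>
    intro cur
    by_cases hnb : pvNb x
    · rw [pvBlocksW, if_pos hnb, ih (cur ++ [x])]
      rw [List.takeWhile_cons_of_pos hnb, List.dropWhile_cons_of_pos hnb]
      by_cases hcur : cur.isEmpty
      · have : cur = [] := by simpa [List.isEmpty_iff] using hcur
        subst this
        rw [pvBlocksR, if_pos hnb]
        simp
      · simp only [if_neg hcur]
        have : (cur ++ [x]).isEmpty = false := by simp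
        simp only [this, if_neg Bool.false_ne_true]
        simp
    · rw [pvBlocksW, if_neg hnb]
      rw [List.takeWhile_cons_of_neg hnb, List.dropWhile_cons_of_neg hnb]
      have h0 := ih []
      simp only [List.isEmpty_nil, if_pos] at h0
      by_cases hcur : cur.isEmpty
      · simp only [if_pos hcur, h0]
        rw [pvBlocksR, if_neg hnb]
      · simp only [if_neg hcur, h0]
        rw [pvBlocksR, if_neg hnb]
        simp

theorem pv_blocks_eq (lines : List (List Char)) : pvBlocks lines = pvBlocksR lines := by
  have h := pv_fold_W lines [] []
  simp only [List.nil_append] at h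
  rw [pvBlocks, h, pv_W]
  simp

-- ===== VERDICT (by name: the statement is the Claim_ definition above) =====
theorem preprocess_transcript_spec : Claim_equal_preprocess_transcript := by
  intro raw _
  unfold Spec_preprocess_transcript preprocess_transcript preprocess_transcript_alt
  rw [PySem.List.foldl_append_eq_flatMap, pv_blocks_eq, List.nil_append,
    ← pv_goA_blocks (PySem.Chars.splitOn raw.toList ['\n']).length _ le_rfl]
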